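-- pv_equiv track=rewrite | github.com/deepakcse2k5/Patterns_for_coding_questions | dynamic_programming/max_energy_boost.py | max_energy_boost
-- ===== SOURCE A (Python) =====
-- def max_energy_boost(energyDrinkA, energyDrinkB):
--     n = len(energyDrinkA)
--
--     # Base case for the first hour
--     dpA = [0] * n
--     dpB = [0] * n
--
--     dpA[0] = energyDrinkA[0]
--     dpB[0] = energyDrinkB[0]
--
--     for i in range(1, n):
--         if i == 1:
--             dpA[i] = dpA[i-1] + energyDrinkA[i]
--             dpB[i] = dpB[i-1] + energyDrinkB[i]
--         else:
--             dpA[i] = max(dpA[i-1] + energyDrinkA[i], dpB[i-2] + energyDrinkA[i])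
--             dpB[i] = max(dpB[i-1] + energyDrinkB[i], dpA[i-2] + energyDrinkB[i])
--
--     return max(dpA[-1], dpB[-1])
-- ===== SOURCE B (Python) =====
-- def max_energy_boost(energyDrinkA, energyDrinkB):
--     # Demand-driven (top-down) memoized evaluation: best(i, useA) = max energy
--     # over hours 0..i ending on the given drink, computed lazily from the two
--     # goal states with a memo dict and an explicit work stack (no dp arrays,
--     # no bottom-up index loop).
--     n = len(energyDrinkA)
--     memo = {}
--
--     def best(i, useA):
--         stack = [(i, useA)]
--         while stack:
--             j, u = stack[-1]
--             if (j, u) in memo: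
--                 stack.pop()
--                 continue
--             cur = energyDrinkA if u else energyDrinkB
--             v = cur[j]
--             if j == 0:
--                 memo[(j, u)] = v
--             elif j == 1:
--                 memo[(j, u)] = cur[0] + v
--             elif (j - 1, u) in memo and (j - 2, not u) in memo:
--                 memo[(j, u)] = v + max(memo[(j - 1, u)], memo[(j - 2, not u)])
--             else:
--                 stack.append((j - 1, u))
--                 stack.append((j - 2, not u))
--                 continue
--             stack.pop()
--         return memo[(i, useA)]
--
--     return max(best(n - 1, True), best(n - 1, False))
-- ===== Notes on version B (the rewrite author's own statement) =====
-- stated objective: alternative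
-- what changed: Replaces A's bottom-up index loop that fills two dp arrays by a demand-driven top-down computation of best(i, drink): the two goal states are evaluated lazily with a memo dict and an explicit work stack, so values are computed on demand from the goal downward instead of unconditionally from hour 0 upward.
import Mathlib
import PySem

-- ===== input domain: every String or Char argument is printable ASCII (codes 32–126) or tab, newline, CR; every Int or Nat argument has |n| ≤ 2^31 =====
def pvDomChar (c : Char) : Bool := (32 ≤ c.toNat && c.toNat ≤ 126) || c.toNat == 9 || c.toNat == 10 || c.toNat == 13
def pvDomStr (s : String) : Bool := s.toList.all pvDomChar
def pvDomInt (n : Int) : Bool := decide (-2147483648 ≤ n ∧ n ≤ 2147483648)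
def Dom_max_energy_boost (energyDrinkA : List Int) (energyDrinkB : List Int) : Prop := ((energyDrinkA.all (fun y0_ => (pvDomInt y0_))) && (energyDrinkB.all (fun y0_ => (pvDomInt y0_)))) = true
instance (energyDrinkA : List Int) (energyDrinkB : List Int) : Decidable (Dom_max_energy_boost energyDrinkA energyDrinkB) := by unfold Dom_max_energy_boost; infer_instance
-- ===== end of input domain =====

-- B replaces A's bottom-up index loop over two dp arrays by a demand-driven top-down
-- memoized evaluation of best(i, drink) with a memo dict and an explicit work stack;
-- objective: alternative (same values, different decomposition, no speed claim).

-- ===== PORT A =====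
-- body of A's 'for i in range(1, n)' loop (branches and assignment order as in the Python)
def stepA (energyDrinkA : List Int) (energyDrinkB : List Int)
    (s : List Int × List Int) (i : Int) : List Int × List Int :=
  if i = 1 then
    (PySem.List.pySetD s.1 i (PySem.List.pyGetD s.1 (i-1) 0 + PySem.List.pyGetD energyDrinkA i 0),
     PySem.List.pySetD s.2 i (PySem.List.pyGetD s.2 (i-1) 0 + PySem.List.pyGetD energyDrinkB i 0))
  else
    let dpA := PySem.List.pySetD s.1 i
      (max (PySem.List.pyGetD s.1 (i-1) 0 + PySem.List.pyGetD energyDrinkA i 0)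
           (PySem.List.pyGetD s.2 (i-2) 0 + PySem.List.pyGetD energyDrinkA i 0))
    let dpB := PySem.List.pySetD s.2 i
      (max (PySem.List.pyGetD s.2 (i-1) 0 + PySem.List.pyGetD energyDrinkB i 0)
           (PySem.List.pyGetD dpA (i-2) 0 + PySem.List.pyGetD energyDrinkB i 0))
    (dpA, dpB)

def max_energy_boost (energyDrinkA : List Int) (energyDrinkB : List Int) : Int :=
  let n := energyDrinkA.length
  let dpA := List.replicate n (0:Int)
  let dpB := List.replicate n (0:Int)
  let dpA := PySem.List.pySetD dpA 0 (PySem.List.pyGetD energyDrinkA 0 0)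
  let dpB := PySem.List.pySetD dpB 0 (PySem.List.pyGetD energyDrinkB 0 0)
  let st := (PySem.List.pyRange 1 (n:Int) 1).foldl (stepA energyDrinkA energyDrinkB) (dpA, dpB)
  max (PySem.List.pyGetD st.1 (-1) 0) (PySem.List.pyGetD st.2 (-1) 0)

-- ===== PORT B =====
-- B's 'while stack:' loop: the stack is a List with its HEAD as Python's stack top
-- (append/pop at the end ↔ cons/uncons at the head); the fuel argument only makes the
-- recursion structural — it is chosen large enough in max_energy_boost_alt and the
-- equivalence proof shows it is never exhausted on admitted inputs.  On 'cur[j]' out of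
-- range Python raises IndexError (PySem.List.pyGet? = none); those inputs are outside
-- Pre_ and the port just stops there.
def bLoop (energyDrinkA : List Int) (energyDrinkB : List Int) :
    Nat → List (Int × Bool) → PySem.Dict (Int × Bool) Int → PySem.Dict (Int × Bool) Int
  | 0, _, m => m
  | _ + 1, [], m => m
  | f + 1, (j, u) :: rest, m =>
    if (m.get? (j, u)).isSome then bLoop energyDrinkA energyDrinkB f rest m
    else
      let cur := if u then energyDrinkA else energyDrinkB
      match PySem.List.pyGet? cur j with
      | none => m
      | some v =>
        if j = 0 then bLoop energyDrinkA energyDrinkB f rest (m.insert (j, u) v)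
        else if j = 1 then
          bLoop energyDrinkA energyDrinkB f rest (m.insert (j, u) (PySem.List.pyGetD cur 0 0 + v))
        else
          match m.get? (j - 1, u), m.get? (j - 2, !u) with
          | some x, some y =>
              bLoop energyDrinkA energyDrinkB f rest (m.insert (j, u) (v + max x y))
          | _, _ =>
              bLoop energyDrinkA energyDrinkB f ((j - 2, !u) :: (j - 1, u) :: (j, u) :: rest) m

def max_energy_boost_alt (energyDrinkA : List Int) (energyDrinkB : List Int) : Int :=
  let n := energyDrinkA.length
  let fuel := 2 * 3 ^ (n + 1)
  let m1 := bLoop energyDrinkA energyDrinkB fuel [((n : Int) - 1, true)] PySem.Dict.empty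
  let r1 := m1.getD ((n : Int) - 1, true) 0
  let m2 := bLoop energyDrinkA energyDrinkB fuel [((n : Int) - 1, false)] m1
  let r2 := m2.getD ((n : Int) - 1, false) 0
  max r1 r2

-- ===== PRECONDITION & SPEC =====
-- A raises IndexError when energyDrinkA is empty (dpA[0]) or when energyDrinkB is
-- shorter than energyDrinkA (energyDrinkB[i]); B raises there too; exactly those
-- inputs are excluded.
def Pre_max_energy_boost (energyDrinkA : List Int) (energyDrinkB : List Int) : Prop :=
  energyDrinkA ≠ [] ∧ energyDrinkA.length ≤ energyDrinkB.length
instance (energyDrinkA : List Int) (energyDrinkB : List Int) : Decidable (Pre_max_energy_boost energyDrinkA energyDrinkB) := by unfold Pre_max_energy_boost; infer_instance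

def pvWitness_max_energy_boost : List Int × List Int := ([4, 1, 1], [1, 1, 3])

def Spec_max_energy_boost (energyDrinkA : List Int) (energyDrinkB : List Int) (out : Int) : Prop := out = max_energy_boost_alt energyDrinkA energyDrinkB
instance (energyDrinkA : List Int) (energyDrinkB : List Int) (out : Int) : Decidable (Spec_max_energy_boost energyDrinkA energyDrinkB out) := by unfold Spec_max_energy_boost; infer_instance

-- ===== CLAIM (what is proved, stated in full; the proofs are below) =====
def Claim_equal_max_energy_boost : Prop := ∀ (energyDrinkA : List Int) (energyDrinkB : List Int), Dom_max_energy_boost energyDrinkA energyDrinkB → Pre_max_energy_boost energyDrinkA energyDrinkB → Spec_max_energy_boost energyDrinkA energyDrinkB (max_energy_boost energyDrinkA energyDrinkB)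

-- ===== LEMMAS AND PROOFS =====

-- the common value: mebF eA eB k = (best ending on drink A at hour k, best ending on drink B at hour k)
def mebF (eA eB : List Int) : Nat → Int × Int
  | 0 => (eA.getD 0 0, eB.getD 0 0)
  | 1 => (eA.getD 0 0 + eA.getD 1 0, eB.getD 0 0 + eB.getD 1 0)
  | (k+2) => (eA.getD (k+2) 0 + max (mebF eA eB (k+1)).1 (mebF eA eB k).2,
              eB.getD (k+2) 0 + max (mebF eA eB (k+1)).2 (mebF eA eB k).1)

-- ---- B side ----
def bSpec (eA eB : List Int) (j : Nat) (u : Bool) : Int :=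
  if u then (mebF eA eB j).1 else (mebF eA eB j).2

-- every memo entry is the intended best(j, u) value at a (cast) Nat index
def MemoOK (eA eB : List Int) (m : PySem.Dict (Int × Bool) Int) : Prop :=
  ∀ k v, m.get? k = some v → ∃ j : Nat, k.1 = (j : Int) ∧ v = bSpec eA eB j k.2

lemma bLoop_nil (eA eB : List Int) (f : Nat) (m : PySem.Dict (Int × Bool) Int) :
    bLoop eA eB f [] m = m := by cases f <;> rfl

lemma bLoop_cons_eq (eA eB : List Int) (f : Nat) (j : Int) (u : Bool)
    (rest : List (Int × Bool)) (m : PySem.Dict (Int × Bool) Int) :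
    bLoop eA eB (f + 1) ((j, u) :: rest) m =
      (if (m.get? (j, u)).isSome then bLoop eA eB f rest m
      else
        match PySem.List.pyGet? (if u then eA else eB) j with
        | none => m
        | some v =>
          if j = 0 then bLoop eA eB f rest (m.insert (j, u) v)
          else if j = 1 then
            bLoop eA eB f rest (m.insert (j, u) (PySem.List.pyGetD (if u then eA else eB) 0 0 + v))
          else
            match m.get? (j - 1, u), m.get? (j - 2, !u) with
            | some x, some y => bLoop eA eB f rest (m.insert (j, u) (v + max x y))
            | _, _ => bLoop eA eB f ((j - 2, !u) :: (j - 1, u) :: (j, u) :: rest) m) := rfl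

lemma bLoop_step0 (eA eB : List Int) (f : Nat) (j : Int) (u : Bool)
    (rest : List (Int × Bool)) (m : PySem.Dict (Int × Bool) Int) (v : Int)
    (hnone : m.get? (j, u) = none)
    (hv : PySem.List.pyGet? (if u then eA else eB) j = some v) (hj0 : j = 0) :
    bLoop eA eB (f + 1) ((j, u) :: rest) m = bLoop eA eB f rest (m.insert (j, u) v) := by
  rw [bLoop_cons_eq, if_neg (by simp [hnone]), hv]
  show (if j = 0 then bLoop eA eB f rest (m.insert (j, u) v)
        else if j = 1 then
          bLoop eA eB f rest (m.insert (j, u) (PySem.List.pyGetD (if u then eA else eB) 0 0 + v))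
        else
          match m.get? (j - 1, u), m.get? (j - 2, !u) with
          | some x, some y => bLoop eA eB f rest (m.insert (j, u) (v + max x y))
          | _, _ => bLoop eA eB f ((j - 2, !u) :: (j - 1, u) :: (j, u) :: rest) m) = _
  rw [if_pos hj0]

lemma bLoop_step1 (eA eB : List Int) (f : Nat) (j : Int) (u : Bool)
    (rest : List (Int × Bool)) (m : PySem.Dict (Int × Bool) Int) (v : Int)
    (hnone : m.get? (j, u) = none)
    (hv : PySem.List.pyGet? (if u then eA else eB) j = some v) (hj1 : j = 1) :
    bLoop eA eB (f + 1) ((j, u) :: rest) m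
      = bLoop eA eB f rest (m.insert (j, u) (PySem.List.pyGetD (if u then eA else eB) 0 0 + v)) := by
  rw [bLoop_cons_eq, if_neg (by simp [hnone]), hv]
  show (if j = 0 then bLoop eA eB f rest (m.insert (j, u) v)
        else if j = 1 then
          bLoop eA eB f rest (m.insert (j, u) (PySem.List.pyGetD (if u then eA else eB) 0 0 + v))
        else
          match m.get? (j - 1, u), m.get? (j - 2, !u) with
          | some x, some y => bLoop eA eB f rest (m.insert (j, u) (v + max x y))
          | _, _ => bLoop eA eB f ((j - 2, !u) :: (j - 1, u) :: (j, u) :: rest) m) = _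
  rw [if_neg (by rw [hj1]; norm_num), if_pos hj1]

lemma bLoop_step2_hit (eA eB : List Int) (f : Nat) (j : Int) (u : Bool)
    (rest : List (Int × Bool)) (m : PySem.Dict (Int × Bool) Int) (v x y : Int)
    (hnone : m.get? (j, u) = none)
    (hv : PySem.List.pyGet? (if u then eA else eB) j = some v)
    (hj0 : j ≠ 0) (hj1 : j ≠ 1)
    (h1 : m.get? (j - 1, u) = some x) (h2 : m.get? (j - 2, !u) = some y) :
    bLoop eA eB (f + 1) ((j, u) :: rest) m
      = bLoop eA eB f rest (m.insert (j, u) (v + max x y)) := by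
  rw [bLoop_cons_eq, if_neg (by simp [hnone]), hv]
  show (if j = 0 then bLoop eA eB f rest (m.insert (j, u) v)
        else if j = 1 then
          bLoop eA eB f rest (m.insert (j, u) (PySem.List.pyGetD (if u then eA else eB) 0 0 + v))
        else
          match m.get? (j - 1, u), m.get? (j - 2, !u) with
          | some x, some y => bLoop eA eB f rest (m.insert (j, u) (v + max x y))
          | _, _ => bLoop eA eB f ((j - 2, !u) :: (j - 1, u) :: (j, u) :: rest) m) = _
  rw [if_neg hj0, if_neg hj1, h1, h2]

lemma bLoop_step2_miss (eA eB : List Int) (f : Nat) (j : Int) (u : Bool)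
    (rest : List (Int × Bool)) (m : PySem.Dict (Int × Bool) Int) (v : Int)
    (hnone : m.get? (j, u) = none)
    (hv : PySem.List.pyGet? (if u then eA else eB) j = some v)
    (hj0 : j ≠ 0) (hj1 : j ≠ 1)
    (hmiss : m.get? (j - 1, u) = none ∨ m.get? (j - 2, !u) = none) :
    bLoop eA eB (f + 1) ((j, u) :: rest) m
      = bLoop eA eB f ((j - 2, !u) :: (j - 1, u) :: (j, u) :: rest) m := by
  rw [bLoop_cons_eq, if_neg (by simp [hnone]), hv]
  show (if j = 0 then bLoop eA eB f rest (m.insert (j, u) v)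
        else if j = 1 then
          bLoop eA eB f rest (m.insert (j, u) (PySem.List.pyGetD (if u then eA else eB) 0 0 + v))
        else
          match m.get? (j - 1, u), m.get? (j - 2, !u) with
          | some x, some y => bLoop eA eB f rest (m.insert (j, u) (v + max x y))
          | _, _ => bLoop eA eB f ((j - 2, !u) :: (j - 1, u) :: (j, u) :: rest) m) = _
  rw [if_neg hj0, if_neg hj1]
  rcases hc1 : m.get? (j - 1, u) with _ | x
  · rfl
  · rcases hc2 : m.get? (j - 2, !u) with _ | y
    · rfl
    · exfalso
      rcases hmiss with h | h
      · rw [hc1] at h; cases h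
      · rw [hc2] at h; cases h

lemma memoOK_get (eA eB : List Int) (m : PySem.Dict (Int × Bool) Int)
    (hOK : MemoOK eA eB m) (j : Nat) (u : Bool) (v : Int)
    (h : m.get? ((j : Int), u) = some v) : v = bSpec eA eB j u := by
  obtain ⟨j', hj', hv⟩ := hOK _ _ h
  have hjj : j = j' := by simp only at hj'; exact_mod_cast hj'
  subst hjj; exact hv

lemma memoOK_empty (eA eB : List Int) : MemoOK eA eB (PySem.Dict.empty) := by
  intro k v h
  rw [PySem.Dict.get?_empty] at h
  exact absurd h (by simp)

lemma memoOK_insert (eA eB : List Int) (m : PySem.Dict (Int × Bool) Int)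
    (hOK : MemoOK eA eB m) (j : Nat) (u : Bool) :
    MemoOK eA eB (m.insert ((j : Int), u) (bSpec eA eB j u)) := by
  intro k v h
  rw [PySem.Dict.get?_insert] at h
  by_cases hk : k = ((j : Int), u)
  · rw [if_pos hk] at h
    exact ⟨j, by rw [hk], by rw [hk]; exact (Option.some.inj h).symm⟩
  · rw [if_neg hk] at h
    exact hOK k v h

lemma memo_persist_insert (m : PySem.Dict (Int × Bool) Int) (key : Int × Bool) (w : Int)
    (hnone : m.get? key = none) (k : Int × Bool) (v : Int) (h : m.get? k = some v) :
    (m.insert key w).get? k = some v := by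
  rw [PySem.Dict.get?_insert, if_neg (by rintro rfl; rw [h] at hnone; cases hnone)]
  exact h

lemma pyGet_cur (eA eB : List Int) (hm : eA.length ≤ eB.length) (u : Bool) (j : Nat)
    (hj : j < eA.length) :
    PySem.List.pyGet? (if u then eA else eB) ((j : Nat) : Int)
      = some ((if u then eA else eB).getD j 0) := by
  have hj2 : j < (if u then eA else eB).length := by cases u <;> simp <;> omega
  rw [PySem.List.pyGet?_natCast, List.getElem?_eq_getElem hj2, List.getD_eq_getElem _ _ hj2]

lemma bSpec_zero (eA eB : List Int) (u : Bool) :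
    bSpec eA eB 0 u = (if u then eA else eB).getD 0 0 := by
  cases u <;> simp [bSpec, mebF]

lemma bSpec_one (eA eB : List Int) (u : Bool) :
    bSpec eA eB 1 u
      = (if u then eA else eB).getD 0 0 + (if u then eA else eB).getD 1 0 := by
  cases u <;> simp [bSpec, mebF]

lemma bSpec_two (eA eB : List Int) (t : Nat) (u : Bool) :
    bSpec eA eB (t + 2) u
      = (if u then eA else eB).getD (t + 2) 0
        + max (bSpec eA eB (t + 1) u) (bSpec eA eB t (!u)) := by
  cases u <;> simp [bSpec, mebF]

lemma pyGetD_zero_cur (eA eB : List Int) (u : Bool) :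
    PySem.List.pyGetD (if u then eA else eB) 0 0 = (if u then eA else eB).getD 0 0 := by
  rw [show (0 : Int) = ((0 : Nat) : Int) from rfl, PySem.List.pyGetD_natCast]

-- one step at a node whose dependencies (for j ≥ 2) are already memoized: the memo
-- gains exactly the intended value best(j, u)
lemma bLoop_node (eA eB : List Int) (hm : eA.length ≤ eB.length) (j : Nat) (u : Bool)
    (rest : List (Int × Bool)) (m : PySem.Dict (Int × Bool) Int) (f : Nat)
    (hOK : MemoOK eA eB m) (hj : j < eA.length)
    (hnone : m.get? (((j : Nat) : Int), u) = none)
    (hdeps : ∀ t : Nat, j = t + 2 →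
      ∃ x y, m.get? (((t + 1 : Nat) : Int), u) = some x ∧ m.get? (((t : Nat) : Int), !u) = some y) :
    bLoop eA eB (f + 1) ((((j : Nat) : Int), u) :: rest) m
      = bLoop eA eB f rest (m.insert (((j : Nat) : Int), u) (bSpec eA eB j u)) := by
  match j, hj, hnone, hdeps with
  | 0, hj, hnone, _ =>
    rw [bSpec_zero]
    exact bLoop_step0 eA eB f _ u rest m _ hnone (pyGet_cur eA eB hm u 0 hj) (by norm_num)
  | 1, hj, hnone, _ =>
    rw [bSpec_one, ← pyGetD_zero_cur]
    exact bLoop_step1 eA eB f _ u rest m _ hnone (pyGet_cur eA eB hm u 1 hj) (by norm_num)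
  | (t+2), hj, hnone, hdeps =>
    obtain ⟨x, y, hx, hy⟩ := hdeps t rfl
    have hx' := memoOK_get eA eB m hOK (t+1) u x hx
    have hy' := memoOK_get eA eB m hOK t (!u) y hy
    have c1 : (((t + 2 : Nat) : Int)) - 1 = ((t + 1 : Nat) : Int) := by push_cast; ring
    have c2 : (((t + 2 : Nat) : Int)) - 2 = ((t : Nat) : Int) := by push_cast; ring
    rw [bSpec_two, ← hx', ← hy']
    exact bLoop_step2_hit eA eB f _ u rest m _ x y hnone (pyGet_cur eA eB hm u (t+2) hj)
      (by omega) (by omega) (by rw [c1]; exact hx) (by rw [c2]; exact hy)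

lemma bLoop_run (eA eB : List Int) (hm : eA.length ≤ eB.length) :
    ∀ j : Nat, ∀ (u : Bool) (rest : List (Int × Bool))
      (m : PySem.Dict (Int × Bool) Int) (f : Nat),
      MemoOK eA eB m → j < eA.length → 3 ^ (j + 1) ≤ f →
      ∃ m' f',
        bLoop eA eB f (((j : Int), u) :: rest) m = bLoop eA eB f' rest m' ∧
        MemoOK eA eB m' ∧
        m'.get? ((j : Int), u) = some (bSpec eA eB j u) ∧
        (∀ k v, m.get? k = some v → m'.get? k = some v) ∧
        f ≤ f' + 3 ^ (j + 1) := by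
  intro j
  induction j using Nat.strong_induction_on with
  | _ j IH =>
    intro u rest m f hOK hj hf
    have hp1 : 1 ≤ 3 ^ (j + 1) := Nat.one_le_pow _ _ (by norm_num)
    obtain ⟨f0, rfl⟩ : ∃ f0, f = f0 + 1 := ⟨f - 1, by omega⟩
    by_cases hmem : (m.get? (((j : Nat) : Int), u)).isSome
    · -- already memoized: one skip step
      obtain ⟨v, hv⟩ := Option.isSome_iff_exists.mp hmem
      refine ⟨m, f0, ?_, hOK, ?_, fun k v h => h, by omega⟩
      · rw [bLoop_cons_eq, if_pos hmem]
      · rw [hv, memoOK_get eA eB m hOK j u v hv]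
    · have hnone : m.get? (((j : Nat) : Int), u) = none := by
        cases hcase : m.get? (((j : Nat) : Int), u) with
        | none => rfl
        | some v => exact absurd (by rw [hcase]; rfl) hmem
      match j, hj, hf, hp1, hnone, IH with
      | 0, hj, hf, hp1, hnone, IH =>
        exact ⟨m.insert (((0 : Nat) : Int), u) (bSpec eA eB 0 u), f0,
          bLoop_node eA eB hm 0 u rest m f0 hOK hj hnone (by omega),
          memoOK_insert eA eB m hOK 0 u, PySem.Dict.get?_insert_self _ _ _,
          memo_persist_insert m _ _ hnone, by omega⟩
      | 1, hj, hf, hp1, hnone, IH =>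
        exact ⟨m.insert (((1 : Nat) : Int), u) (bSpec eA eB 1 u), f0,
          bLoop_node eA eB hm 1 u rest m f0 hOK hj hnone (by omega),
          memoOK_insert eA eB m hOK 1 u, PySem.Dict.get?_insert_self _ _ _,
          memo_persist_insert m _ _ hnone, by omega⟩
      | (t+2), hj, hf, hp1, hnone, IH =>
        have c1 : (((t + 2 : Nat) : Int)) - 1 = ((t + 1 : Nat) : Int) := by push_cast; ring
        have c2 : (((t + 2 : Nat) : Int)) - 2 = ((t : Nat) : Int) := by push_cast; ring
        have e2 : (3:Nat) ^ (t + 2) = 3 * 3 ^ (t + 1) := by ring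
        have e3 : (3:Nat) ^ (t + 3) = 9 * 3 ^ (t + 1) := by ring
        have ha1 : 1 ≤ (3:Nat) ^ (t + 1) := Nat.one_le_pow _ _ (by norm_num)
        by_cases hdep : (∃ x, m.get? (((t + 1 : Nat) : Int), u) = some x)
                        ∧ (∃ y, m.get? (((t : Nat) : Int), !u) = some y)
        · -- both dependencies memoized: resolve in one step
          obtain ⟨⟨x, hx⟩, ⟨y, hy⟩⟩ := hdep
          refine ⟨m.insert (((t + 2 : Nat) : Int), u) (bSpec eA eB (t+2) u), f0,
            bLoop_node eA eB hm (t+2) u rest m f0 hOK hj hnone ?_,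
            memoOK_insert eA eB m hOK (t+2) u, PySem.Dict.get?_insert_self _ _ _,
            memo_persist_insert m _ _ hnone, by omega⟩
          intro t' ht'
          have : t' = t := by omega
          subst this
          exact ⟨x, y, hx, hy⟩
        · -- a dependency is missing: push both and revisit (j, u)
          have hmiss : m.get? ((((t + 2 : Nat) : Int)) - 1, u) = none
              ∨ m.get? ((((t + 2 : Nat) : Int)) - 2, !u) = none := by
            rw [c1, c2]
            rcases hc1 : m.get? (((t + 1 : Nat) : Int), u) with _ | x
            · exact Or.inl rfl
            · rcases hc2 : m.get? (((t : Nat) : Int), !u) with _ | y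
              · exact Or.inr rfl
              · exact absurd ⟨⟨x, hc1⟩, ⟨y, hc2⟩⟩ hdep
          have hpush := bLoop_step2_miss eA eB f0 (((t + 2 : Nat) : Int)) u rest m _
            hnone (pyGet_cur eA eB hm u (t+2) hj) (by omega) (by omega) hmiss
          rw [hpush, c1, c2]
          obtain ⟨m1, f1, heq1, hOK1, hget1, hpers1, hf1⟩ :=
            IH t (by omega) (!u) ((((t + 1 : Nat) : Int), u) :: (((t + 2 : Nat) : Int), u) :: rest)
              m f0 hOK (by omega) (by omega)
          obtain ⟨m2, f2, heq2, hOK2, hget2, hpers2, hf2⟩ :=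
            IH (t + 1) (by omega) u ((((t + 2 : Nat) : Int), u) :: rest) m1 f1 hOK1 (by omega) (by omega)
          have hd1 : m2.get? (((t + 1 : Nat) : Int), u) = some (bSpec eA eB (t+1) u) := hget2
          have hd2 : m2.get? (((t : Nat) : Int), !u) = some (bSpec eA eB t (!u)) :=
            hpers2 _ _ hget1
          obtain ⟨f3, rfl⟩ : ∃ f3, f2 = f3 + 1 := ⟨f2 - 1, by omega⟩
          rw [heq1, heq2]
          by_cases hmem2 : (m2.get? (((t + 2 : Nat) : Int), u)).isSome
          · obtain ⟨v, hv⟩ := Option.isSome_iff_exists.mp hmem2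
            refine ⟨m2, f3, ?_, hOK2, ?_, fun k v h => hpers2 _ _ (hpers1 _ _ h), by omega⟩
            · rw [bLoop_cons_eq, if_pos hmem2]
            · rw [hv, memoOK_get eA eB m2 hOK2 (t+2) u v hv]
          · have hnone2 : m2.get? (((t + 2 : Nat) : Int), u) = none := by
              cases hcase : m2.get? (((t + 2 : Nat) : Int), u) with
              | none => rfl
              | some v => exact absurd (by rw [hcase]; rfl) hmem2
            refine ⟨m2.insert (((t + 2 : Nat) : Int), u) (bSpec eA eB (t+2) u), f3,
              bLoop_node eA eB hm (t+2) u rest m2 f3 hOK2 hj hnone2 ?_,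
              memoOK_insert eA eB m2 hOK2 (t+2) u, PySem.Dict.get?_insert_self _ _ _,
              (fun k v h => memo_persist_insert m2 _ _ hnone2 k v (hpers2 _ _ (hpers1 _ _ h))),
              by omega⟩
            intro t' ht'
            have : t' = t := by omega
            subst this
            exact ⟨_, _, hd1, hd2⟩

lemma B_val (eA eB : List Int) (h0 : eA ≠ []) (hm : eA.length ≤ eB.length) :
    max_energy_boost_alt eA eB
      = max (mebF eA eB (eA.length - 1)).1 (mebF eA eB (eA.length - 1)).2 := by
  have hlen : 0 < eA.length := List.length_pos_iff.mpr h0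
  have hc : ((eA.length : Int)) - 1 = ((eA.length - 1 : Nat) : Int) := by
    push_cast [Nat.cast_sub hlen]; ring
  have hfuel : 3 ^ (eA.length - 1 + 1) ≤ 2 * 3 ^ (eA.length + 1) := by
    calc 3 ^ (eA.length - 1 + 1) ≤ 3 ^ (eA.length + 1) :=
          Nat.pow_le_pow_right (by norm_num) (by omega)
      _ ≤ 2 * 3 ^ (eA.length + 1) := by omega
  obtain ⟨m1, f1, h1, hOK1, hget1, _, _⟩ :=
    bLoop_run eA eB hm (eA.length - 1) true [] PySem.Dict.empty (2 * 3 ^ (eA.length + 1))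
      (memoOK_empty eA eB) (by omega) hfuel
  obtain ⟨m2, f2, h2, hOK2, hget2, _, _⟩ :=
    bLoop_run eA eB hm (eA.length - 1) false [] m1 (2 * 3 ^ (eA.length + 1))
      hOK1 (by omega) hfuel
  show max ((bLoop eA eB (2 * 3 ^ (eA.length + 1)) [((eA.length : Int) - 1, true)] PySem.Dict.empty).getD ((eA.length : Int) - 1, true) 0)
           ((bLoop eA eB (2 * 3 ^ (eA.length + 1)) [((eA.length : Int) - 1, false)]
              (bLoop eA eB (2 * 3 ^ (eA.length + 1)) [((eA.length : Int) - 1, true)] PySem.Dict.empty)).getD ((eA.length : Int) - 1, false) 0)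
      = _
  rw [hc, h1, bLoop_nil, h2, bLoop_nil,
      PySem.Dict.getD_eq_get?_getD, PySem.Dict.getD_eq_get?_getD, hget1, hget2]
  simp [bSpec]

-- ---- A side ----
def initA (eA eB : List Int) : List Int × List Int :=
  (PySem.List.pySetD (List.replicate eA.length (0:Int)) 0 (PySem.List.pyGetD eA 0 0),
   PySem.List.pySetD (List.replicate eA.length (0:Int)) 0 (PySem.List.pyGetD eB 0 0))

def InvA (eA eB : List Int) (k : Nat) (s : List Int × List Int) : Prop :=
  s.1.length = eA.length ∧ s.2.length = eA.length ∧
    ∀ m : Nat, m < k → s.1.getD m 0 = (mebF eA eB m).1 ∧ s.2.getD m 0 = (mebF eA eB m).2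

lemma getD_set_ne (xs : List Int) (n m : Nat) (v d : Int) (h : m ≠ n) :
    (xs.set n v).getD m d = xs.getD m d := by
  simp [List.getD, List.getElem?_set_ne (by omega : n ≠ m)]

lemma getD_set_self (xs : List Int) (n : Nat) (v d : Int) (h : n < xs.length) :
    (xs.set n v).getD n d = v := by
  rw [List.getD_eq_getElem _ _ (by simpa using h)]
  simp

lemma stepA_inv (eA eB : List Int) (k : Nat) (hk1 : 1 ≤ k) (hkn : k < eA.length)
    (s : List Int × List Int) (hs : InvA eA eB k s) :
    InvA eA eB (k+1) (stepA eA eB s (k:Int)) := by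
  obtain ⟨hl1, hl2, hv⟩ := hs
  by_cases hk : k = 1
  · subst hk
    have hrep : stepA eA eB s ((1:Nat):Int)
        = (s.1.set 1 (s.1.getD 0 0 + eA.getD 1 0), s.2.set 1 (s.2.getD 0 0 + eB.getD 1 0)) := by
      simp [stepA, pysem]
    rw [hrep]
    refine ⟨by simp [hl1], by simp [hl2], ?_⟩
    intro m hm
    interval_cases m
    · rw [getD_set_ne _ _ _ _ _ (by omega), getD_set_ne _ _ _ _ _ (by omega)]
      exact hv 0 (by omega)
    · rw [getD_set_self _ _ _ _ (by omega), getD_set_self _ _ _ _ (by omega)]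
      have h0 := hv 0 (by omega)
      refine ⟨?_, ?_⟩
      · rw [h0.1]; simp [mebF]
      · rw [h0.2]; simp [mebF]
  · obtain ⟨k', rfl⟩ : ∃ k', k = k' + 2 := ⟨k - 2, by omega⟩
    have hne : ((k' + 2 : Nat) : Int) ≠ 1 := by omega
    have c1 : ((k' + 2 : Nat) : Int) - 1 = ((k' + 1 : Nat) : Int) := by omega
    have c2 : ((k' + 2 : Nat) : Int) - 2 = ((k' : Nat) : Int) := by omega
    have hrep : stepA eA eB s ((k' + 2 : Nat) : Int)
        = (s.1.set (k'+2) (max (s.1.getD (k'+1) 0 + eA.getD (k'+2) 0) (s.2.getD k' 0 + eA.getD (k'+2) 0)),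
           s.2.set (k'+2) (max (s.2.getD (k'+1) 0 + eB.getD (k'+2) 0) (s.1.getD k' 0 + eB.getD (k'+2) 0))) := by
      simp only [stepA, if_neg hne, c1, c2]
      simp only [PySem.List.pySetD_natCast, PySem.List.pyGetD_natCast]
      rw [getD_set_ne _ _ _ _ _ (by omega)]
    rw [hrep]
    refine ⟨by simp [hl1], by simp [hl2], ?_⟩
    intro m hm
    rcases Nat.lt_or_ge m (k'+2) with hmlt | hmge
    · rw [getD_set_ne _ _ _ _ _ (by omega), getD_set_ne _ _ _ _ _ (by omega)]
      exact hv m hmlt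
    · have hmeq : m = k' + 2 := by omega
      subst hmeq
      rw [getD_set_self _ _ _ _ (by omega), getD_set_self _ _ _ _ (by omega)]
      have h1 := hv (k'+1) (by omega)
      have h2 := hv k' (by omega)
      refine ⟨?_, ?_⟩ <;>
        · simp only [mebF, h1.1, h1.2, h2.1, h2.2]
          rw [max_add_add_right, add_comm]

lemma loopA (eA eB : List Int) (h0 : eA ≠ []) :
    ∀ k : Nat, 1 ≤ k → k ≤ eA.length →
      InvA eA eB k ((PySem.List.pyRange 1 (k:Int) 1).foldl (stepA eA eB) (initA eA eB)) := by
  intro k hk1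
  induction k, hk1 using Nat.le_induction with
  | base =>
      intro _
      have hlen : 0 < eA.length := List.length_pos_iff.mpr h0
      rw [show ((1:Nat):Int) = 1 from by norm_num, PySem.List.pyRange_one_eq_nil le_rfl]
      simp only [List.foldl_nil]
      have hrep : initA eA eB
          = ((List.replicate eA.length (0:Int)).set 0 (eA.getD 0 0),
             (List.replicate eA.length (0:Int)).set 0 (eB.getD 0 0)) := by
        simp [initA, pysem]
      rw [hrep]
      refine ⟨by simp, by simp, ?_⟩
      intro m hm
      interval_cases m
      rw [getD_set_self _ _ _ _ (by simpa using hlen), getD_set_self _ _ _ _ (by simpa using hlen)]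
      exact ⟨by simp [mebF], by simp [mebF]⟩
  | succ k hk ih =>
      intro hkn
      have hcast : ((k+1:Nat):Int) = (k:Int) + 1 := by push_cast; ring
      rw [hcast, PySem.List.pyRange_one_succ_right (by omega : (1:Int) ≤ (k:Int)), List.foldl_append]
      simp only [List.foldl_cons, List.foldl_nil]
      exact stepA_inv eA eB k hk (by omega) _ (ih (by omega))

lemma A_val (eA eB : List Int) (h0 : eA ≠ []) :
    max_energy_boost eA eB
      = max (mebF eA eB (eA.length - 1)).1 (mebF eA eB (eA.length - 1)).2 := by
  have hlen : 0 < eA.length := List.length_pos_iff.mpr h0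
  obtain ⟨hL1, hL2, hv⟩ := loopA eA eB h0 eA.length (by omega) le_rfl
  unfold max_energy_boost
  show max (PySem.List.pyGetD ((PySem.List.pyRange 1 (eA.length:Int) 1).foldl (stepA eA eB) (initA eA eB)).1 (-1) 0)
           (PySem.List.pyGetD ((PySem.List.pyRange 1 (eA.length:Int) 1).foldl (stepA eA eB) (initA eA eB)).2 (-1) 0)
      = _
  set st := (PySem.List.pyRange 1 (eA.length:Int) 1).foldl (stepA eA eB) (initA eA eB) with hst
  have hne1 : st.1 ≠ [] := by
    intro h; rw [h] at hL1; simp at hL1; omega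
  have hne2 : st.2 ≠ [] := by
    intro h; rw [h] at hL2; simp at hL2; omega
  rw [PySem.List.pyGetD_neg_one st.1 0 hne1, PySem.List.pyGetD_neg_one st.2 0 hne2,
      List.getLast_eq_getElem, List.getLast_eq_getElem,
      ← List.getD_eq_getElem st.1 0 (by omega), ← List.getD_eq_getElem st.2 0 (by omega)]
  rw [hL1, hL2]
  have := hv (eA.length - 1) (by omega)
  rw [this.1, this.2]

lemma meb_eq (eA eB : List Int) (h0 : eA ≠ []) (hm : eA.length ≤ eB.length) :
    max_energy_boost eA eB = max_energy_boost_alt eA eB := by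
  rw [A_val eA eB h0, B_val eA eB h0 hm]

-- ===== VERDICT (by name: the statement is the Claim_ definition above) =====
theorem max_energy_boost_spec : Claim_equal_max_energy_boost := by
  intro eA eB _ hpre
  unfold Spec_max_energy_boost
  exact meb_eq eA eB hpre.1 hpre.2
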